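-- pv_equiv track=rewrite | github.com/omegaestable/magma-ai | _hard2_full_analysis.py | check_count2
-- ===== SOURCE A (Python) =====
-- def var_counts(s):
--     counts = {}
--     for c in s:
--         if c.isalpha():
--             counts[c] = counts.get(c, 0) + 1
--     return counts
--
-- def check_count2(lhs, rhs):
--     lc = var_counts(lhs)
--     rc = var_counts(rhs)
--     all_vars = set(lc.keys()) | set(rc.keys())
--     for v in all_vars:
--         if lc.get(v, 0) % 2 != rc.get(v, 0) % 2:
--             return False
--     return True
-- ===== SOURCE B (Python) =====
-- def check_count2(lhs, rhs):
--     def odd_set(s):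
--         odd = set()
--         for c in s:
--             if c.isalpha():
--                 if c in odd:
--                     odd.discard(c)
--                 else:
--                     odd.add(c)
--         return odd
--     return odd_set(lhs) == odd_set(rhs)
-- ===== Notes on version B (the rewrite author's own statement) =====
-- stated objective: simpler
-- what changed: Replaces the per-string count dictionaries, the key-set union and the final parity-comparison loop with one toggled odd-occurrence set per string compared by a single set equality.
import Mathlib
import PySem

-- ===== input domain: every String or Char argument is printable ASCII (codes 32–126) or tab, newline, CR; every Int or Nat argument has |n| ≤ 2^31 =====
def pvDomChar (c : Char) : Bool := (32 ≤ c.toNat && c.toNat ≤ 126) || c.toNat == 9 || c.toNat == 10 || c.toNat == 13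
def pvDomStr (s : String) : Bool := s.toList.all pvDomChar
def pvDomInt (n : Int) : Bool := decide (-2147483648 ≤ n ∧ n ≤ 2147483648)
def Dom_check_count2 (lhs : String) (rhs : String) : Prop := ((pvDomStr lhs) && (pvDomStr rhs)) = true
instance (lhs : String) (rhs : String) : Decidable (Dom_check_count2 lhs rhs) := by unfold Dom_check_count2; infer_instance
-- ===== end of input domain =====

-- B replaces the count dictionaries, the key-set union and the parity-comparison loop
-- with one toggled odd-occurrence set per string, compared by a single set equality (objective: simpler).

-- ===== PORT A =====
def var_counts (s : String) : PySem.Dict Char Int :=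
  s.toList.foldl
    (fun counts c =>
      if PySem.Chars.isalpha c then counts.insert c (counts.getD c 0 + 1) else counts)
    PySem.Dict.empty

def check_count2 (lhs : String) (rhs : String) : Bool :=
  let lc := var_counts lhs
  let rc := var_counts rhs
  let all_vars := PySem.Set.union (PySem.Set.ofList lc.keys) rc.keys
  -- 'for v in all_vars: if mismatch: return False' then 'return True' = all match
  all_vars.all (fun v => PySem.Int.mod (lc.getD v 0) 2 == PySem.Int.mod (rc.getD v 0) 2)

-- ===== PORT B =====
def odd_set (s : String) : PySem.Set Char :=
  s.toList.foldl
    (fun odd c =>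
      if PySem.Chars.isalpha c then
        if PySem.Set.contains odd c then PySem.Set.discard odd c else PySem.Set.add odd c
      else odd)
    PySem.Set.empty

def check_count2_alt (lhs : String) (rhs : String) : Bool :=
  PySem.Set.equal (odd_set lhs) (odd_set rhs)

-- ===== PRECONDITION & SPEC =====
def Spec_check_count2 (lhs : String) (rhs : String) (out : Bool) : Prop := out = check_count2_alt lhs rhs
instance (lhs : String) (rhs : String) (out : Bool) : Decidable (Spec_check_count2 lhs rhs out) := by unfold Spec_check_count2; infer_instance

-- ===== CLAIM (what is proved, stated in full; the proofs are below) =====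
def Claim_equal_check_count2 : Prop := ∀ (lhs : String) (rhs : String), Dom_check_count2 lhs rhs → Spec_check_count2 lhs rhs (check_count2 lhs rhs)

-- ===== LEMMAS AND PROOFS =====

-- A's dictionary holds the count of each alpha character
theorem vc_getD (l : List Char) (d : PySem.Dict Char Int) (v : Char) :
    (l.foldl (fun counts c =>
        if PySem.Chars.isalpha c then counts.insert c (counts.getD c 0 + 1) else counts) d).getD v 0
      = d.getD v 0 + ((l.filter PySem.Chars.isalpha).count v : Int) := by
  induction l generalizing d with
  | nil => simp
  | cons c l ih =>
    rw [List.foldl_cons]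
    by_cases hc : PySem.Chars.isalpha c = true
    · rw [if_pos hc, ih, PySem.Dict.getD_insert]
      simp only [List.filter_cons, hc, if_pos]
      by_cases hvc : v = c
      · subst hvc; simp [List.count_cons_self]; ring
      · simp [hvc, Ne.symm hvc]
    · rw [if_neg hc, ih]
      simp [hc]

theorem vc_mem_keys (l : List Char) (d : PySem.Dict Char Int) (v : Char) :
    v ∈ (l.foldl (fun counts c =>
        if PySem.Chars.isalpha c then counts.insert c (counts.getD c 0 + 1) else counts) d).keys
      ↔ v ∈ d.keys ∨ v ∈ l.filter PySem.Chars.isalpha := by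
  induction l generalizing d with
  | nil => simp
  | cons c l ih =>
    rw [List.foldl_cons]
    by_cases hc : PySem.Chars.isalpha c = true
    · rw [if_pos hc, ih]
      simp only [PySem.Dict.mem_keys_insert, List.filter_cons, hc, if_pos, List.mem_cons]
      tauto
    · rw [if_neg hc, ih]
      simp [hc]

-- B's toggled set: membership records the parity of the alpha count seen so far
theorem odd_mem (l : List Char) (os : PySem.Set Char) (v : Char) :
    (v ∈ l.foldl (fun odd c =>
        if PySem.Chars.isalpha c then
          if PySem.Set.contains odd c then PySem.Set.discard odd c else PySem.Set.add odd c
        else odd) os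
      ↔ ((v ∈ os) ↔ (l.filter PySem.Chars.isalpha).count v % 2 = 0)) := by
  induction l generalizing os with
  | nil => simp
  | cons c l ih =>
    rw [List.foldl_cons]
    by_cases hc : PySem.Chars.isalpha c = true
    · rw [if_pos hc, ih]
      have htog : (v ∈ (if PySem.Set.contains os c then PySem.Set.discard os c else PySem.Set.add os c))
          ↔ (if v = c then ¬ (v ∈ os) else v ∈ os) := by
        by_cases hm : c ∈ os
        · rw [if_pos (by simpa using hm)]
          by_cases hvc : v = c
          · subst hvc; simp [PySem.Set.mem_discard, hm]
          · simp [PySem.Set.mem_discard, hvc]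
        · rw [if_neg (by simpa using hm)]
          by_cases hvc : v = c
          · subst hvc; simp [hm]
          · simp [PySem.Set.mem_add, hvc]
      rw [htog]
      simp only [List.filter_cons, hc, if_pos]
      by_cases hvc : v = c
      · subst hvc
        simp only [List.count_cons_self]
        by_cases hm : v ∈ os <;> simp [hm] <;> omega
      · rw [if_neg hvc]
        simp [Ne.symm hvc]
    · rw [if_neg hc, ih]
      simp [hc]

theorem odd_set_mem (s : String) (v : Char) :
    v ∈ odd_set s ↔ (s.toList.filter PySem.Chars.isalpha).count v % 2 = 1 := by
  unfold odd_set
  rw [odd_mem]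
  simp only [PySem.Set.empty, List.not_mem_nil, false_iff]
  omega

theorem vc_getD_count (s : String) (v : Char) :
    (var_counts s).getD v 0 = ((s.toList.filter PySem.Chars.isalpha).count v : Int) := by
  unfold var_counts; rw [vc_getD]; simp

theorem vc_keys_mem (s : String) (v : Char) :
    v ∈ (var_counts s).keys ↔ v ∈ s.toList.filter PySem.Chars.isalpha := by
  unfold var_counts; rw [vc_mem_keys]; simp [PySem.Dict.keys_empty]

theorem mod_two_cast (n : Nat) : PySem.Int.mod (n : Int) 2 = ((n % 2 : Nat) : Int) := by
  simp [PySem.Int.mod, Int.fmod_eq_emod]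

theorem check_count2_iff (lhs rhs : String) :
    check_count2 lhs rhs = true ↔
      ∀ v : Char, (lhs.toList.filter PySem.Chars.isalpha).count v % 2
        = (rhs.toList.filter PySem.Chars.isalpha).count v % 2 := by
  unfold check_count2
  simp only [List.all_eq_true, beq_iff_eq]
  constructor
  · intro h v
    by_cases hv : v ∈ PySem.Set.union (PySem.Set.ofList (var_counts lhs).keys) (var_counts rhs).keys
    · have := h v hv
      rw [vc_getD_count, vc_getD_count, mod_two_cast, mod_two_cast] at this
      exact_mod_cast this
    · rw [PySem.Set.mem_union, PySem.Set.mem_ofList, vc_keys_mem, vc_keys_mem] at hv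
      push Not at hv
      rw [List.count_eq_zero_of_not_mem hv.1, List.count_eq_zero_of_not_mem hv.2]
  · intro h v _
    rw [vc_getD_count, vc_getD_count, mod_two_cast, mod_two_cast]
    exact_mod_cast h v

theorem check_count2_alt_iff (lhs rhs : String) :
    check_count2_alt lhs rhs = true ↔
      ∀ v : Char, (lhs.toList.filter PySem.Chars.isalpha).count v % 2
        = (rhs.toList.filter PySem.Chars.isalpha).count v % 2 := by
  unfold check_count2_alt
  rw [PySem.Set.equal_iff]
  constructor
  · intro h v
    have := h v
    rw [odd_set_mem, odd_set_mem] at this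
    omega
  · intro h v
    rw [odd_set_mem, odd_set_mem, h v]

-- ===== VERDICT (by name: the statement is the Claim_ definition above) =====
theorem check_count2_spec : Claim_equal_check_count2 := by
  intro lhs rhs _
  unfold Spec_check_count2
  rw [Bool.eq_iff_iff, check_count2_iff, check_count2_alt_iff]
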